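-- pv_equiv track=rewrite | github.com/HTprog/Applied-Programming-for-Data-Analytics | DSA/L04/ListSum.py | list_sum_recursive2
-- ===== SOURCE A (Python) =====
-- def list_sum_recursive2(num_list):
--     if len(num_list) == 1:
--         return num_list[0]
--     else:
--         a= num_list[0]
--         b = list_sum_recursive2(num_list[1:])
--         print (a , " + " , b)
--         return a+b
-- ===== SOURCE B (Python) =====
-- def list_sum_recursive2(num_list):
--     total = num_list[-1]
--     for x in reversed(num_list[:-1]):
--         print(x, " + ", total)
--         total += x
--     return total
-- ===== Notes on version B (the rewrite author's own statement) =====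
-- stated objective: faster
-- what changed: Replaced the recursion with num_list[1:] copies (quadratic slicing, deep call stack) by a single reverse loop accumulating a suffix sum, printing the same lines in unwind order.
-- outside the precondition, e.g. on list_sum_recursive2([]): A raises IndexError, B raises IndexError
import Mathlib
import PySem

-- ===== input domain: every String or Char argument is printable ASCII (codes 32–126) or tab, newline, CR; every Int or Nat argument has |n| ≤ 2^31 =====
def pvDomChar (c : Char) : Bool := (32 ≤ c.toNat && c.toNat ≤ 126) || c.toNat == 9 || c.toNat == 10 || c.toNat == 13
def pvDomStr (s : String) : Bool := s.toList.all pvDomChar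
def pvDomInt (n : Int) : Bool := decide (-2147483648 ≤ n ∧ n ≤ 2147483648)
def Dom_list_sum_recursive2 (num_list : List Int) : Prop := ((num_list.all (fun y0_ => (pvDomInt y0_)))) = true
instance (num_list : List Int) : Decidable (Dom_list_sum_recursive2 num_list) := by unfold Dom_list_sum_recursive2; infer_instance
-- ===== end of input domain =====

-- B replaces A's recursion on num_list[1:] slices by a single reverse loop keeping a
-- suffix sum (objective: faster, O(n) vs O(n^2)); equivalence is about the RETURN value
-- (both also print the same lines).

-- ===== PORT A =====
def list_sum_recursive2 (num_list : List Int) : Int :=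
  if num_list.length = 1 then (PySem.List.pyGet? num_list 0).getD 0
  else
    match h : PySem.List.pyGet? num_list 0 with
    | none => 0  -- num_list[0] raises IndexError here (empty list); excluded by Pre_
    | some a =>
      let b := list_sum_recursive2 (PySem.List.slice num_list (some 1) none)
      a + b
termination_by num_list.length
decreasing_by
  cases num_list with
  | nil => simp_all [PySem.List.pyGet?, PySem.List.pyIdx?]
  | cons x xs => simp [PySem.List.slice_from_one]

-- ===== PORT B =====
def list_sum_recursive2_alt (num_list : List Int) : Int :=
  match PySem.List.pyGet? num_list (-1) with
  | none => 0  -- num_list[-1] raises IndexError here (empty list); excluded by Pre_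
  | some total =>
    ((PySem.List.slice num_list none (some (-1))).reverse).foldl
      (fun total x => total + x) total

-- ===== PRECONDITION & SPEC =====
-- Pre_ excludes only the empty list, on which A raises IndexError.
def Pre_list_sum_recursive2 (num_list : List Int) : Prop := num_list ≠ []
instance (num_list : List Int) : Decidable (Pre_list_sum_recursive2 num_list) := by unfold Pre_list_sum_recursive2; infer_instance
def pvWitness_list_sum_recursive2 : List Int := [3, -1, 4]

def Spec_list_sum_recursive2 (num_list : List Int) (out : Int) : Prop := out = list_sum_recursive2_alt num_list
instance (num_list : List Int) (out : Int) : Decidable (Spec_list_sum_recursive2 num_list out) := by unfold Spec_list_sum_recursive2; infer_instance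

-- ===== CLAIM (what is proved, stated in full; the proofs are below) =====
def Claim_equal_list_sum_recursive2 : Prop := ∀ (num_list : List Int), Dom_list_sum_recursive2 num_list → Pre_list_sum_recursive2 num_list → Spec_list_sum_recursive2 num_list (list_sum_recursive2 num_list)

-- ===== LEMMAS AND PROOFS =====

-- A computes the list sum on every nonempty list.
theorem list_sum_recursive2_eq_sum (num_list : List Int) (h : num_list ≠ []) :
    list_sum_recursive2 num_list = num_list.sum := by
  induction num_list with
  | nil => exact absurd rfl h
  | cons a rest ih =>
    rw [list_sum_recursive2]
    by_cases h1 : (a :: rest).length = 1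
    · have : rest = [] := by cases rest <;> simp_all
      subst this; simp [PySem.List.pyGet?_zero_cons]
    · have hr : rest ≠ [] := by cases rest <;> simp_all
      simp only [h1, if_false]
      split
      · next heq => simp at heq
      · next a' heq =>
        simp only [PySem.List.pyGet?_zero_cons, Option.some.injEq] at heq
        subst heq
        simp only [PySem.List.slice_from_one, List.tail_cons, ih hr, List.sum_cons]

-- B computes the list sum on every nonempty list.
theorem list_sum_recursive2_alt_eq_sum (num_list : List Int) (h : num_list ≠ []) :
    list_sum_recursive2_alt num_list = num_list.sum := by
  obtain h' | ⟨ys, t, rfl⟩ := num_list.eq_nil_or_concat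
  · exact absurd h' h
  simp only [List.concat_eq_append]
  unfold list_sum_recursive2_alt
  rw [PySem.List.pyGet?_neg_one_append_singleton]
  rw [PySem.List.slice_to_neg_one]
  clear h
  simp [add_comm]
  induction ys with
  | nil => simp
  | cons y ys2 ih2 => simp [ih2]; ring

-- ===== VERDICT (by name: the statement is the Claim_ definition above) =====
theorem list_sum_recursive2_spec : Claim_equal_list_sum_recursive2 := by
  intro num_list _ hpre
  unfold Spec_list_sum_recursive2
  rw [list_sum_recursive2_eq_sum num_list hpre, list_sum_recursive2_alt_eq_sum num_list hpre]
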